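-- pv_equiv track=rewrite | github.com/Eben-Success/A2SVOnboarding | A2SV_Education/bit_manipulation/H. Maximal AND.py | solve
-- ===== SOURCE A (Python) =====
-- def solve(nums, k):
--
--     res = ""
--
--     for i in range(30, -1, -1):
--         count = 0
--
--         for num in nums:
--             if num & (1 << i) == 0:
--                 count += 1
--         if count <= k:
--             res += "1"
--             k -= count
--         else:
--             res += "0"
--
--     return int(res, 2)
-- ===== SOURCE B (Python) =====
-- def solve(nums, k):
--     # Candidate-mask greedy: instead of maintaining a residual budget and a bit
--     # string, keep the answer mask itself and, for each bit, test feasibility of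
--     # the enlarged candidate by recomputing its full cost from scratch as a sum
--     # of popcounts: cost(m) = sum of popcount(m & ~num) over nums = number of
--     # (element, chosen bit) pairs where the element lacks the chosen bit.
--     def cost(m):
--         return sum((m & ~num).bit_count() for num in nums)
--     mask = 0
--     for i in range(30, -1, -1):
--         cand = mask | (1 << i)
--         if cost(cand) <= k:
--             mask = cand
--     return mask
-- ===== Notes on version B (the rewrite author's own statement) =====
-- stated objective: alternative
-- what changed: B drops A's residual budget and bit-string accumulator entirely: it keeps the candidate answer mask itself and decides each bit by recomputing from scratch the total cost of the enlarged candidate as a sum of popcounts (m & ~num).bit_count(), rather than A's per-bit count of elements missing that bit compared against a decremented k.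
import Mathlib
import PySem

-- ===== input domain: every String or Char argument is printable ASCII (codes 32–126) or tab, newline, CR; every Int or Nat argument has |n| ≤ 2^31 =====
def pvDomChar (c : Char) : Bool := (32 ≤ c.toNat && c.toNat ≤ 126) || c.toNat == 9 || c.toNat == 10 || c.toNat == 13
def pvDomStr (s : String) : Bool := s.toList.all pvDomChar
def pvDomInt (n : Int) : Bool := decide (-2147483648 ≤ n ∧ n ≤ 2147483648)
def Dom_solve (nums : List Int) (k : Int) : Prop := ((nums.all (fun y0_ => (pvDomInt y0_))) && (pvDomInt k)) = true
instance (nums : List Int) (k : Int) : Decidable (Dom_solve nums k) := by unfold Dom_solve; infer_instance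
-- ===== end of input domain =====

-- B replaces A's residual-budget greedy over a bit string by a candidate-mask greedy that
-- re-evaluates each enlarged candidate's total cost from scratch as a sum of popcounts (alternative).

-- ===== PORT A =====
-- i ∈ range(30,-1,-1) is always in [0,30], so 'i.toNat' in the shift amount is exact
def solve (nums : List Int) (k : Int) : Int :=
  let st := (PySem.List.pyRange 30 (-1) (-1)).foldl
    (fun (st : String × Int) i =>
      let count := nums.foldl
        (fun count num =>
          if PySem.Int.band num ((1 : Int) <<< (i.toNat : Int)) = 0 then count + 1 else count) (0 : Int)
      if count ≤ st.2 then (st.1 ++ "1", st.2 - count) else (st.1 ++ "0", st.2))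
    ("", k)
  -- int(res, 2): res consists only of '0'/'1', so this base-2 fold is Python-exact
  st.1.toList.foldl (fun acc c => acc * 2 + (if c = '1' then 1 else 0)) 0

-- ===== PORT B =====
-- m & ~num ≥ 0 here, so Python's (m & ~num).bit_count() is PySem.Int.bitCount exactly
def solve_alt (nums : List Int) (k : Int) : Int :=
  let cost : Int → Int := fun m =>
    nums.foldl (fun t num => t + (PySem.Int.bitCount (PySem.Int.band m (Int.not num)) : Int)) 0
  (PySem.List.pyRange 30 (-1) (-1)).foldl
    (fun mask i =>
      let cand := PySem.Int.bor mask ((1 : Int) <<< (i.toNat : Int))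
      if cost cand ≤ k then cand else mask) 0

-- ===== PRECONDITION & SPEC =====
def Spec_solve (nums : List Int) (k : Int) (out : Int) : Prop := out = solve_alt nums k
instance (nums : List Int) (k : Int) (out : Int) : Decidable (Spec_solve nums k out) := by unfold Spec_solve; infer_instance

-- ===== CLAIM =====
def Claim_equal_solve : Prop := ∀ (nums : List Int) (k : Int), Dom_solve nums k → Spec_solve nums k (solve nums k)

-- ===== LEMMAS AND PROOFS =====

-- number of elements of nums with bit j unset (A's inner count, bit index as Nat)
def cnt (nums : List Int) (j : Nat) : Int :=
  nums.foldl (fun c num => if PySem.Int.band num ((1 : Int) <<< (j : Int)) = 0 then c + 1 else c) 0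

-- B's cost function: total popcount of mask-bits missing from the elements
def cost (nums : List Int) (m : Int) : Int :=
  nums.foldl (fun t num => t + (PySem.Int.bitCount (PySem.Int.band m (Int.not num)) : Int)) 0

-- ---- generic Nat bit lemmas ----

lemma or_mod_two (a b : Nat) : (a ||| b) % 2 = a % 2 + b % 2 - a % 2 * (b % 2) := by
  have h := Nat.testBit_lor a b 0
  have h2 : ((a ||| b) % 2 = 1) ↔ (a % 2 = 1 ∨ b % 2 = 1) := by
    have h3 := congrArg (fun x => x = true) h
    simp only [Nat.testBit_zero, decide_eq_true_eq, Bool.or_eq_true] at h3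
    exact h3 ▸ Iff.rfl
  have hm := Nat.mod_two_eq_zero_or_one (a ||| b)
  have ha := Nat.mod_two_eq_zero_or_one a
  have hb := Nat.mod_two_eq_zero_or_one b
  rcases ha with ha | ha <;> rcases hb with hb | hb <;> rw [ha, hb] <;> omega

lemma or_eq_add (a b : Nat) (h : a &&& b = 0) : a ||| b = a + b := by
  induction a using Nat.strong_induction_on generalizing b with
  | _ a ih =>
    rcases Nat.eq_zero_or_pos a with rfl | hpos
    · simp
    have hhalf : a / 2 &&& b / 2 = 0 := by
      rw [← Nat.and_div_two, h]
    have ih2 := ih (a / 2) (by omega) (b / 2) hhalf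
    have hdiv : (a ||| b) / 2 = a / 2 ||| b / 2 := Nat.or_div_two
    have hlow : a % 2 * (b % 2) = 0 := by
      have h0 := Nat.testBit_land a b 0
      rw [h] at h0
      simp only [Nat.testBit_zero] at h0
      have ha := Nat.mod_two_eq_zero_or_one a
      have hb := Nat.mod_two_eq_zero_or_one b
      rcases ha with ha | ha <;> rcases hb with hb | hb <;> simp [ha, hb] at h0 ⊢
    have hmod : (a ||| b) % 2 = a % 2 + b % 2 := by
      rw [or_mod_two a b, hlow]
      omega
    have e1 := Nat.div_add_mod (a ||| b) 2
    omega

lemma and_two_pow_of_false (n j : Nat) (h : n.testBit j = false) : n &&& 2 ^ j = 0 := by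
  apply Nat.eq_of_testBit_eq
  intro i
  rw [Nat.testBit_land, Nat.zero_testBit]
  by_cases hij : j = i
  · subst hij; simp [h]
  · rw [Nat.testBit_two_pow, decide_eq_false hij]
    cases n.testBit i <;> rfl

lemma and_two_pow_of_true (n j : Nat) (h : n.testBit j = true) : n &&& 2 ^ j = 2 ^ j := by
  apply Nat.eq_of_testBit_eq
  intro i
  rw [Nat.testBit_land, Nat.testBit_two_pow]
  by_cases hij : j = i
  · subst hij; simp [h]
  · rw [decide_eq_false hij]
    cases n.testBit i <;> rfl

lemma add_pow_eq_or (M j : Nat) (h : M.testBit j = false) : M + 2 ^ j = M ||| 2 ^ j :=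
  (or_eq_add M (2 ^ j) (and_two_pow_of_false M j h)).symm

lemma sub_and_eq_ldiff (m n : Nat) : m - (m &&& n) = m.ldiff n := by
  have hdisj : m.ldiff n &&& (m &&& n) = 0 := by
    apply Nat.eq_of_testBit_eq
    intro i
    rw [Nat.testBit_land, Nat.testBit_ldiff, Nat.testBit_land, Nat.zero_testBit]
    cases m.testBit i <;> cases n.testBit i <;> rfl
  have hor : m.ldiff n ||| (m &&& n) = m := by
    apply Nat.eq_of_testBit_eq
    intro i
    rw [Nat.testBit_lor, Nat.testBit_ldiff, Nat.testBit_land]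
    cases m.testBit i <;> cases n.testBit i <;> rfl
  have := or_eq_add _ _ hdisj
  omega

lemma testBit_even_mul_pow (A i : Nat) : ((2 * A) * 2 ^ i).testBit i = false := by
  induction i with
  | zero =>
    simp only [pow_zero, Nat.mul_one, Nat.testBit_zero, decide_eq_false_iff_not]
    omega
  | succ i ih =>
    rw [Nat.testBit_add_one]
    have h2 : 2 * A * 2 ^ (i + 1) = (2 * A * 2 ^ i) * 2 := by rw [pow_succ]; ring
    have : 2 * A * 2 ^ (i + 1) / 2 = 2 * A * 2 ^ i := by omega
    rw [this]
    exact ih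

-- bitCount halving, valid also at 0
lemma bc_halve (x : Nat) : PySem.Int.bitCount (x : Int) = x % 2 + PySem.Int.bitCount ((x / 2 : Nat) : Int) := by
  rcases Nat.eq_zero_or_pos x with rfl | hx
  · decide
  · exact PySem.Int.bitCount_natCast hx

lemma bc_add_pow (i : Nat) : ∀ x : Nat, x.testBit i = false →
    PySem.Int.bitCount ((x + 2 ^ i : Nat) : Int) = PySem.Int.bitCount (x : Int) + 1 := by
  induction i with
  | zero =>
    intro x hx
    simp only [Nat.testBit_zero, decide_eq_false_iff_not] at hx
    have hev : x % 2 = 0 := by omega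
    rw [bc_halve (x + 2 ^ 0), bc_halve x]
    have h1 : (x + 2 ^ 0) % 2 = 1 := by simp only [pow_zero]; omega
    have h2 : (x + 2 ^ 0) / 2 = x / 2 := by simp only [pow_zero]; omega
    rw [h1, h2]
    omega
  | succ i ih =>
    intro x hx
    rw [Nat.testBit_add_one] at hx
    rw [bc_halve (x + 2 ^ (i + 1)), bc_halve x]
    have h0 : 2 ^ (i + 1) = 2 ^ i * 2 := by rw [pow_succ]
    have h1 : (x + 2 ^ (i + 1)) % 2 = x % 2 := by omega
    have h2 : (x + 2 ^ (i + 1)) / 2 = x / 2 + 2 ^ i := by omega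
    rw [h1, h2, ih (x / 2) hx]
    omega

lemma int_not_eq (n : Int) : Int.not n = -n - 1 := by
  cases n with
  | ofNat m => show Int.negSucc m = _ ; simp [Int.negSucc_eq] ; omega
  | negSucc m => show (m : Int) = _ ; simp [Int.negSucc_eq]

lemma one_shl (j : Nat) : ((1 : Int) <<< (j : Int)) = ((2 ^ j : Nat) : Int) := by
  have h := Int.shiftLeft_natCast 1 j
  simp only [Nat.cast_one] at h
  rw [h, Nat.one_shiftLeft]

-- evaluating Python's  M & ~num  for a nonnegative mask, num ≥ 0
lemma band_not_nonneg (M : Nat) (n : Nat) :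
    PySem.Int.band (M : Int) (Int.not (n : Int)) = ((M.ldiff n : Nat) : Int) := by
  have hnot : Int.not (n : Int) = -(n : Int) - 1 := int_not_eq _
  have hneg : ¬ (0 ≤ Int.not (n : Int)) := by rw [hnot]; omega
  unfold PySem.Int.band
  rw [if_pos (by positivity), if_neg hneg]
  have h1 : (-(Int.not (n : Int)) - 1) = (n : Int) := by rw [hnot]; ring
  rw [h1, Int.toNat_natCast, Int.toNat_natCast, sub_and_eq_ldiff]

-- evaluating Python's  M & ~num  for a nonnegative mask, num < 0 (~num = m ≥ 0)
lemma band_not_neg (M : Nat) (num : Int) (hn : num < 0) :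
    PySem.Int.band (M : Int) (Int.not num) = ((M &&& (-num - 1).toNat : Nat) : Int) := by
  have hnot : Int.not num = -num - 1 := int_not_eq _
  have h0 : (0 : Int) ≤ -num - 1 := by omega
  rw [hnot, ← Int.toNat_of_nonneg h0, PySem.Int.band_natCast, Int.toNat_natCast]

-- evaluating Python's  num & (1 << j)
lemma band_pow_nonneg (n j : Nat) :
    PySem.Int.band (n : Int) ((1 : Int) <<< (j : Int)) = ((n &&& 2 ^ j : Nat) : Int) := by
  rw [one_shl, PySem.Int.band_natCast]

lemma band_pow_neg (num : Int) (j : Nat) (hn : num < 0) :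
    PySem.Int.band num ((1 : Int) <<< (j : Int)) = ((2 ^ j - (2 ^ j &&& (-num - 1).toNat) : Nat) : Int) := by
  rw [one_shl]
  unfold PySem.Int.band
  rw [if_neg (by omega), if_pos (by positivity)]
  rw [Int.toNat_natCast]

-- ---- per-element cost increment ----

-- adding a fresh bit j to a nonnegative mask M raises popcount(M & ~num) by 1
-- exactly when num lacks bit j
lemma bc_band_not_add (num : Int) (M j : Nat) (hM : M.testBit j = false) :
    (PySem.Int.bitCount (PySem.Int.band ((M + 2 ^ j : Nat) : Int) (Int.not num)) : Int)
      = (PySem.Int.bitCount (PySem.Int.band (M : Int) (Int.not num)) : Int)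
        + (if PySem.Int.band num ((1 : Int) <<< (j : Int)) = 0 then 1 else 0) := by
  rcases lt_or_ge num 0 with hneg | hpos
  · -- num < 0 : M & ~num = M &&& m, with m = (~num).toNat
    set m : Nat := (-num - 1).toNat with hm
    rw [band_not_neg (M + 2 ^ j) num hneg, band_not_neg M num hneg, band_pow_neg num j hneg]
    cases hbit : m.testBit j with
    | true =>
      have hδ : (2 ^ j - (2 ^ j &&& m) : Nat) = 0 := by
        rw [Nat.land_comm, and_two_pow_of_true m j hbit]
        exact Nat.sub_self _
      rw [← hm, hδ]
      simp only [Nat.cast_zero, if_pos]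
      have hand : (M + 2 ^ j) &&& m = (M &&& m) + 2 ^ j := by
        rw [add_pow_eq_or M j hM]
        have h1 : (M ||| 2 ^ j) &&& m = (M &&& m) ||| (2 ^ j &&& m) := by
          apply Nat.eq_of_testBit_eq
          intro i
          simp only [Nat.testBit_land, Nat.testBit_lor]
          cases M.testBit i <;> cases (2 ^ j).testBit i <;> cases m.testBit i <;> rfl
        rw [h1, Nat.land_comm (2 ^ j) m, and_two_pow_of_true m j hbit]
        apply or_eq_add
        apply and_two_pow_of_false
        rw [Nat.testBit_land, hM]
        rfl
      rw [hand, bc_add_pow j (M &&& m) (by rw [Nat.testBit_land, hM]; rfl)]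
      push_cast
      ring
    | false =>
      have hδ : (2 ^ j - (2 ^ j &&& m) : Nat) = 2 ^ j := by
        rw [Nat.land_comm, and_two_pow_of_false m j hbit]
        exact Nat.sub_zero _
      rw [← hm, hδ]
      rw [if_neg (by simp)]
      have hand : (M + 2 ^ j) &&& m = M &&& m := by
        rw [add_pow_eq_or M j hM]
        apply Nat.eq_of_testBit_eq
        intro i
        simp only [Nat.testBit_land, Nat.testBit_lor]
        by_cases hij : i = j
        · subst hij; rw [hbit, hM]; cases (2 ^ i).testBit i <;> rfl
        · rw [Nat.testBit_two_pow, decide_eq_false (by omega)]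
          cases M.testBit i <;> rfl
      rw [hand]
      ring
  · -- num ≥ 0 : M & ~num = M.ldiff n
    obtain ⟨n, rfl⟩ := Int.eq_ofNat_of_zero_le hpos
    rw [band_not_nonneg (M + 2 ^ j) n, band_not_nonneg M n, band_pow_nonneg n j]
    cases hbit : n.testBit j with
    | true =>
      rw [if_neg (by rw [and_two_pow_of_true n j hbit]; simp)]
      have hld : (M + 2 ^ j).ldiff n = M.ldiff n := by
        rw [add_pow_eq_or M j hM]
        apply Nat.eq_of_testBit_eq
        intro i
        simp only [Nat.testBit_ldiff, Nat.testBit_lor]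
        by_cases hij : i = j
        · subst hij; rw [hbit, hM]; cases (2 ^ i).testBit i <;> rfl
        · rw [Nat.testBit_two_pow, decide_eq_false (by omega)]
          cases M.testBit i <;> rfl
      rw [hld]
      ring
    | false =>
      rw [if_pos (by rw [and_two_pow_of_false n j hbit]; rfl)]
      have hld : (M + 2 ^ j).ldiff n = (M.ldiff n) + 2 ^ j := by
        rw [add_pow_eq_or M j hM]
        have h1 : (M ||| 2 ^ j).ldiff n = (M.ldiff n) ||| ((2 ^ j).ldiff n) := by
          apply Nat.eq_of_testBit_eq
          intro i
          simp only [Nat.testBit_ldiff, Nat.testBit_lor]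
          cases M.testBit i <;> cases (2 ^ j).testBit i <;> cases n.testBit i <;> rfl
        have h2 : (2 ^ j).ldiff n = 2 ^ j := by
          apply Nat.eq_of_testBit_eq
          intro i
          rw [Nat.testBit_ldiff]
          by_cases hij : i = j
          · subst hij; simp [hbit]
          · rw [Nat.testBit_two_pow, decide_eq_false (by omega : ¬ j = i)]
            rfl
        rw [h1, h2]
        apply or_eq_add
        apply and_two_pow_of_false
        rw [Nat.testBit_ldiff, hM]
        rfl
      rw [hld, bc_add_pow j (M.ldiff n) (by rw [Nat.testBit_ldiff, hM]; rfl)]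
      push_cast
      ring

-- ---- cost / cnt characterisations ----

lemma cost_go (nums : List Int) (m : Int) (t : Int) :
    nums.foldl (fun t num => t + (PySem.Int.bitCount (PySem.Int.band m (Int.not num)) : Int)) t
      = t + cost nums m := by
  induction nums generalizing t with
  | nil => simp [cost]
  | cons num nums ih =>
    unfold cost
    simp only [List.foldl_cons]
    rw [ih, ih]
    ring

lemma cnt_go (nums : List Int) (j : Nat) (c : Int) :
    nums.foldl (fun c num => if PySem.Int.band num ((1 : Int) <<< (j : Int)) = 0 then c + 1 else c) c
      = c + cnt nums j := by
  induction nums generalizing c with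
  | nil => simp [cnt]
  | cons num nums ih =>
    unfold cnt
    simp only [List.foldl_cons]
    rw [ih, ih]
    split_ifs <;> ring

lemma cost_add_pow (nums : List Int) (M j : Nat) (hM : M.testBit j = false) :
    cost nums ((M + 2 ^ j : Nat) : Int) = cost nums (M : Int) + cnt nums j := by
  induction nums with
  | nil => simp [cost, cnt]
  | cons num nums ih =>
    have e1 : cost (num :: nums) ((M + 2 ^ j : Nat) : Int)
        = (PySem.Int.bitCount (PySem.Int.band ((M + 2 ^ j : Nat) : Int) (Int.not num)) : Int)
          + cost nums ((M + 2 ^ j : Nat) : Int) := by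
      unfold cost; simp only [List.foldl_cons]; rw [cost_go]; unfold cost; ring_nf
    have e2 : cost (num :: nums) (M : Int)
        = (PySem.Int.bitCount (PySem.Int.band (M : Int) (Int.not num)) : Int)
          + cost nums (M : Int) := by
      unfold cost; simp only [List.foldl_cons]; rw [cost_go]; unfold cost; ring_nf
    have e3 : cnt (num :: nums) j
        = (if PySem.Int.band num ((1 : Int) <<< (j : Int)) = 0 then 1 else 0) + cnt nums j := by
      unfold cnt; simp only [List.foldl_cons]; rw [cnt_go]; split_ifs <;> simp [cnt]
    rw [e1, e2, e3, ih, bc_band_not_add num M j hM]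
    ring

lemma cost_zero (nums : List Int) : cost nums 0 = 0 := by
  induction nums with
  | nil => simp [cost]
  | cons num nums ih =>
    have h0 : PySem.Int.band 0 (Int.not num) = 0 := by
      rw [PySem.Int.band_comm, PySem.Int.band_zero]
    have step : cost (num :: nums) 0
        = (PySem.Int.bitCount (PySem.Int.band 0 (Int.not num)) : Int) + cost nums 0 := by
      unfold cost
      simp only [List.foldl_cons]
      rw [cost_go]
      unfold cost
      ring_nf
    rw [step, h0, PySem.Int.bitCount_zero, ih]
    simp

-- ---- the canonical greedy both loops compute ----

def stepG (nums : List Int) (st : Int × Int) (i : Int) : Int × Int :=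
  if cnt nums i.toNat ≤ st.2 then (2 * st.1 + 1, st.2 - cnt nums i.toNat) else (2 * st.1, st.2)

-- base-2 parse of A's result string
def parse (s : String) : Int :=
  s.toList.foldl (fun acc c => acc * 2 + (if c = '1' then 1 else 0)) 0

lemma parse_append_one (s : String) : parse (s ++ "1") = 2 * parse s + 1 := by
  simp [parse, List.foldl_append]; ring_nf

lemma parse_append_zero (s : String) : parse (s ++ "0") = 2 * parse s := by
  simp [parse, List.foldl_append]; ring_nf

-- A's loop agrees with the canonical greedy
lemma loopA (nums : List Int) (L : List Int) (s : String) (k : Int) :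
    (parse
      (L.foldl
        (fun (st : String × Int) i =>
          if nums.foldl
              (fun count num =>
                if PySem.Int.band num ((1 : Int) <<< (i.toNat : Int)) = 0 then count + 1 else count) (0 : Int)
              ≤ st.2 then
            (st.1 ++ "1",
              st.2 - nums.foldl
                (fun count num =>
                  if PySem.Int.band num ((1 : Int) <<< (i.toNat : Int)) = 0 then count + 1 else count) (0 : Int))
          else (st.1 ++ "0", st.2))
        (s, k)).1,
     (L.foldl
        (fun (st : String × Int) i =>
          if nums.foldl
              (fun count num =>
                if PySem.Int.band num ((1 : Int) <<< (i.toNat : Int)) = 0 then count + 1 else count) (0 : Int)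
              ≤ st.2 then
            (st.1 ++ "1",
              st.2 - nums.foldl
                (fun count num =>
                  if PySem.Int.band num ((1 : Int) <<< (i.toNat : Int)) = 0 then count + 1 else count) (0 : Int))
          else (st.1 ++ "0", st.2))
        (s, k)).2)
    = L.foldl (stepG nums) (parse s, k) := by
  induction L generalizing s k with
  | nil => simp
  | cons i L ih =>
    have hcnt : nums.foldl
        (fun count num =>
          if PySem.Int.band num ((1 : Int) <<< (i.toNat : Int)) = 0 then count + 1 else count) (0 : Int)
        = cnt nums i.toNat := rfl
    simp only [List.foldl_cons, hcnt, stepG]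
    split_ifs with h
    · rw [← parse_append_one s]; exact ih (s ++ "1") (k - cnt nums i.toNat)
    · rw [← parse_append_zero s]; exact ih (s ++ "0") k

-- B's loop agrees with the canonical greedy
lemma loopB (nums : List Int) (k : Int) (i : Nat) :
    ∀ (A : Nat) (kr : Int), cost nums ((A * 2 ^ i : Nat) : Int) = k - kr →
    ((PySem.List.pyRange ((i : Int) - 1) (-1) (-1)).foldl
      (fun mask t =>
        let cand := PySem.Int.bor mask ((1 : Int) <<< (t.toNat : Int))
        if cost nums cand ≤ k then cand else mask) ((A * 2 ^ i : Nat) : Int))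
    = ((PySem.List.pyRange ((i : Int) - 1) (-1) (-1)).foldl (stepG nums) ((A : Int), kr)).1 := by
  induction i with
  | zero =>
    intro A kr _
    rw [show ((0 : Nat) : Int) - 1 = -1 by norm_num, PySem.List.pyRange_neg_one_eq_nil (by norm_num)]
    simp
  | succ i ih =>
    intro A kr hc
    have hsimp : ((i + 1 : Nat) : Int) - 1 = ((i : Nat) : Int) := by push_cast; ring
    rw [hsimp, PySem.List.pyRange_neg_one_cons (by omega : (-1 : Int) < (i : Nat))]
    simp only [List.foldl_cons, stepG, Int.toNat_natCast]
    have htb : (A * 2 ^ (i + 1)).testBit i = false := by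
      have h : A * 2 ^ (i + 1) = (2 * A) * 2 ^ i := by rw [pow_succ]; ring
      rw [h]
      exact testBit_even_mul_pow A i
    have hcand : PySem.Int.bor ((A * 2 ^ (i + 1) : Nat) : Int) ((1 : Int) <<< ((i : Nat) : Int))
        = ((A * 2 ^ (i + 1) + 2 ^ i : Nat) : Int) := by
      rw [one_shl, PySem.Int.bor_natCast, ← add_pow_eq_or _ _ htb]
    rw [hcand]
    have hcost : cost nums ((A * 2 ^ (i + 1) + 2 ^ i : Nat) : Int)
        = k - kr + cnt nums i := by
      rw [cost_add_pow nums _ _ htb, hc]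
    by_cases hcase : cnt nums i ≤ kr
    · rw [if_pos (by rw [hcost]; omega), if_pos hcase]
      have hval : (A * 2 ^ (i + 1) + 2 ^ i : Nat) = (2 * A + 1) * 2 ^ i := by
        rw [pow_succ]; ring
      rw [hval]
      have hih := ih (2 * A + 1) (kr - cnt nums i) (by rw [← hval, hcost]; ring)
      rw [show ((2 * A + 1 : Nat) : Int) = 2 * (A : Int) + 1 by push_cast; ring] at hih
      exact hih
    · rw [if_neg (by rw [hcost]; omega), if_neg hcase]
      have hval : (A * 2 ^ (i + 1) : Nat) = (2 * A) * 2 ^ i := by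
        rw [pow_succ]; ring
      rw [hval]
      have hih := ih (2 * A) kr (by rw [← hval]; exact hc)
      rw [show ((2 * A : Nat) : Int) = 2 * (A : Int) by push_cast; ring] at hih
      exact hih

-- ===== VERDICT =====
set_option maxRecDepth 8000 in
theorem solve_spec : Claim_equal_solve := by
  intro nums k _
  unfold Spec_solve
  have hA := congrArg Prod.fst (loopA nums (PySem.List.pyRange 30 (-1) (-1)) "" k)
  have hB := loopB nums k 31 0 k (by simpa using cost_zero nums)
  rw [show ((31 : Nat) : Int) - 1 = 30 from by norm_num] at hB
  rw [show ((0 * 2 ^ 31 : Nat) : Int) = 0 from by norm_num] at hB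
  exact (hA.trans (congrArg (fun l => (List.foldl (stepG nums) l (PySem.List.pyRange 30 (-1) (-1))).1) (show (parse "", k) = (((0 : Nat) : Int), k) from by norm_num [parse]))).trans hB.symm
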